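-- pv_equiv track=rewrite | github.com/MyCodeIsAI/polymarketbot | src/insider_scanner/scoring.py | _check_hedging
-- ===== SOURCE A (Python) =====
-- from typing import Optional, List, Dict, Any, Tuple
--
-- def _check_hedging(positions: List[Dict]) -> bool:
--     """Check if wallet has hedging positions (both YES and NO on same market)."""
--     market_sides: Dict[str, set] = {}
--
--     for pos in positions:
--         market_id = pos.get("market_id", "")
--         side = pos.get("side", "")
--         if market_id:
--             if market_id not in market_sides:
--                 market_sides[market_id] = set()
--             market_sides[market_id].add(side)
--
--     # Hedging = having both YES and NO on same market
--     for sides in market_sides.values():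
--         if "YES" in sides and "NO" in sides:
--             return True
--     return False
-- ===== SOURCE B (Python) =====
-- def _check_hedging(positions):
--     """Check if wallet has hedging positions (both YES and NO on same market)."""
--     yes_markets = {p.get("market_id", "") for p in positions
--                    if p.get("side", "") == "YES" and p.get("market_id", "")}
--     no_markets = {p.get("market_id", "") for p in positions
--                   if p.get("side", "") == "NO" and p.get("market_id", "")}
--     return bool(yes_markets & no_markets)
-- ===== Notes on version B (the rewrite author's own statement) =====
-- stated objective: simpler
-- what changed: Replaces A's dict-of-sets grouping pass plus a second scan over the groups by building two flat sets of market ids (YES-markets, NO-markets) and testing their intersection for non-emptiness.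
import Mathlib
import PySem

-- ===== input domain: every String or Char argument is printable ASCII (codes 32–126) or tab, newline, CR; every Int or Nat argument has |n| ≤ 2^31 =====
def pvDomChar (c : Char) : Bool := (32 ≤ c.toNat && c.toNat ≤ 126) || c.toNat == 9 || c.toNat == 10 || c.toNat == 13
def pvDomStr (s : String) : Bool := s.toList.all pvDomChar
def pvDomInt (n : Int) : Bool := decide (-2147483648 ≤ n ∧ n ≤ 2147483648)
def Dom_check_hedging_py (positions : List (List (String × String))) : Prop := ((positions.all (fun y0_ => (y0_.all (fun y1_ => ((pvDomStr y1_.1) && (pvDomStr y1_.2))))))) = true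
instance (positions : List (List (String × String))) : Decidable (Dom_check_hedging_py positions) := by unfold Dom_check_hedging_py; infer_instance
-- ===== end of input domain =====

-- B replaces A's dict-of-sets grouping plus per-group scan by two flat market-id
-- sets (YES-markets and NO-markets) and a single set intersection (objective: simpler).

-- ===== PORT A =====
-- one iteration of A's first loop: group sides by truthy market_id
def aStep (d : PySem.Dict String (PySem.Set String)) (pos : List (String × String)) :
    PySem.Dict String (PySem.Set String) :=
  let market_id := (PySem.Dict.mk pos).getD "market_id" ""
  let side := (PySem.Dict.mk pos).getD "side" ""
  if market_id ≠ "" then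
    -- `if market_id not in market_sides: market_sides[market_id] = set()`
    let d1 := if d.contains market_id then d else d.insert market_id PySem.Set.empty
    -- `market_sides[market_id].add(side)` (in-place add = overwrite at same position)
    d1.insert market_id (PySem.Set.add (d1.getD market_id PySem.Set.empty) side)
  else d

def check_hedging_py (positions : List (List (String × String))) : Bool :=
  let market_sides := positions.foldl aStep PySem.Dict.empty
  -- `for sides in market_sides.values(): if "YES" in sides and "NO" in sides: return True`
  market_sides.values.any (fun sides => PySem.Set.contains sides "YES" && PySem.Set.contains sides "NO")

-- ===== PORT B =====
-- set comprehension: market ids of positions with the given side and a truthy market_id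
def altMarkets (positions : List (List (String × String))) (s : String) : PySem.Set String :=
  PySem.Set.ofList
    ((positions.filter (fun p =>
        (PySem.Dict.mk p).getD "side" "" == s && !((PySem.Dict.mk p).getD "market_id" "" == ""))).map
      (fun p => (PySem.Dict.mk p).getD "market_id" ""))

def check_hedging_py_alt (positions : List (List (String × String))) : Bool :=
  -- `bool(yes_markets & no_markets)`
  !(PySem.Set.inter (altMarkets positions "YES") (altMarkets positions "NO")).isEmpty

-- ===== PRECONDITION & SPEC =====
def Spec_check_hedging_py (positions : List (List (String × String))) (out : Bool) : Prop := out = check_hedging_py_alt positions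
instance (positions : List (List (String × String))) (out : Bool) : Decidable (Spec_check_hedging_py positions out) := by unfold Spec_check_hedging_py; infer_instance

-- ===== CLAIM (what is proved, stated in full; the proofs are below) =====
def Claim_equal_check_hedging_py : Prop := ∀ (positions : List (List (String × String))), Dom_check_hedging_py positions → Spec_check_hedging_py positions (check_hedging_py positions)

-- ===== LEMMAS AND PROOFS =====

-- the hedging property both programs decide
def pvHedged (positions : List (List (String × String))) : Prop :=
  ∃ m : String, m ≠ "" ∧
    (∃ p ∈ positions, (PySem.Dict.mk p).getD "market_id" "" = m ∧ (PySem.Dict.mk p).getD "side" "" = "YES") ∧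
    (∃ p ∈ positions, (PySem.Dict.mk p).getD "market_id" "" = m ∧ (PySem.Dict.mk p).getD "side" "" = "NO")

lemma altMarkets_mem (positions : List (List (String × String))) (s m : String) :
    m ∈ altMarkets positions s ↔
      ∃ p ∈ positions, (PySem.Dict.mk p).getD "market_id" "" = m ∧
        m ≠ "" ∧ (PySem.Dict.mk p).getD "side" "" = s := by
  simp only [altMarkets, PySem.Set.mem_ofList, List.mem_map, List.mem_filter]
  constructor
  · rintro ⟨p, ⟨hp, hf⟩, rfl⟩
    simp only [Bool.and_eq_true, beq_iff_eq, Bool.not_eq_true', beq_eq_false_iff_ne] at hf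
    exact ⟨p, hp, rfl, hf.2, hf.1⟩
  · rintro ⟨p, hp, rfl, hne, hs⟩
    exact ⟨p, ⟨hp, by simp [hs, hne]⟩, rfl⟩

lemma alt_iff (positions : List (List (String × String))) :
    check_hedging_py_alt positions = true ↔ pvHedged positions := by
  simp only [check_hedging_py_alt, Bool.not_eq_true', List.isEmpty_eq_false_iff_exists_mem]
  constructor
  · rintro ⟨m, hm⟩
    rcases (PySem.Set.mem_inter _ _ _).mp hm with ⟨hy, hn⟩
    rcases (altMarkets_mem _ _ _).mp hy with ⟨p, hp, hpm, hne, hps⟩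
    rcases (altMarkets_mem _ _ _).mp hn with ⟨q, hq, hqm, _, hqs⟩
    exact ⟨m, hne, ⟨p, hp, hpm, hps⟩, ⟨q, hq, hqm, hqs⟩⟩
  · rintro ⟨m, hne, ⟨p, hp, hpm, hps⟩, ⟨q, hq, hqm, hqs⟩⟩
    exact ⟨m, (PySem.Set.mem_inter _ _ _).mpr
      ⟨(altMarkets_mem _ _ _).mpr ⟨p, hp, hpm, hne, hps⟩,
       (altMarkets_mem _ _ _).mpr ⟨q, hq, hqm, hne, hqs⟩⟩⟩

-- the grouping fold: membership in the set stored at m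
lemma foldl_aStep_getD (l : List (List (String × String)))
    (d : PySem.Dict String (PySem.Set String)) (m s : String) :
    s ∈ (l.foldl aStep d).getD m PySem.Set.empty ↔
      s ∈ d.getD m PySem.Set.empty ∨
        ∃ p ∈ l, (PySem.Dict.mk p).getD "market_id" "" = m ∧ m ≠ "" ∧
          (PySem.Dict.mk p).getD "side" "" = s := by
  induction l generalizing d with
  | nil => simp
  | cons p l ih =>
    simp only [List.foldl_cons, ih, List.mem_cons]
    have step : s ∈ (aStep d p).getD m PySem.Set.empty ↔
        s ∈ d.getD m PySem.Set.empty ∨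
          ((PySem.Dict.mk p).getD "market_id" "" = m ∧ m ≠ "" ∧
            (PySem.Dict.mk p).getD "side" "" = s) := by
      unfold aStep
      set k := (PySem.Dict.mk p).getD "market_id" "" with hk
      set sd := (PySem.Dict.mk p).getD "side" "" with hsd
      by_cases hkne : k ≠ ""
      · simp only [if_pos hkne]
        set d1 := if d.contains k then d else d.insert k PySem.Set.empty with hd1
        have hgd1 : d1.getD k PySem.Set.empty = d.getD k PySem.Set.empty := by
          rw [hd1]; split_ifs with hc
          · rfl
          · rw [PySem.Dict.getD_insert_self]
            have : d.get? k = none := by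
              rw [PySem.Dict.get?_eq_none_iff_not_mem_keys]
              intro hmem
              rw [← PySem.Dict.contains_iff_mem_keys] at hmem
              simp [hmem] at hc
            simp [PySem.Dict.getD, this]
        by_cases hmk : m = k
        · subst hmk
          rw [PySem.Dict.getD_insert_self, PySem.Set.mem_add, hgd1]
          constructor
          · rintro (h | rfl)
            · exact Or.inl h
            · exact Or.inr ⟨rfl, hkne, rfl⟩
          · rintro (h | ⟨_, _, rfl⟩)
            · exact Or.inl h
            · exact Or.inr rfl
        · rw [PySem.Dict.getD_insert_of_ne _ _ _ hmk]
          have hgd1m : d1.getD m PySem.Set.empty = d.getD m PySem.Set.empty := by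
            rw [hd1]; split_ifs with hc
            · rfl
            · rw [PySem.Dict.getD_insert_of_ne _ _ _ hmk]
          rw [hgd1m]
          constructor
          · exact Or.inl
          · rintro (h | ⟨hm, _, _⟩)
            · exact h
            · exact absurd hm.symm hmk
      · rw [not_not] at hkne
        rw [if_neg (by simp [hkne])]
        constructor
        · exact Or.inl
        · rintro (h | ⟨hm, hne, _⟩)
          · exact h
          · exact (hne (by rw [← hm, hkne])).elim
    rw [step]
    constructor
    · rintro ((h | h) | ⟨q, hq, hx⟩)
      · exact Or.inl h
      · exact Or.inr ⟨p, Or.inl rfl, h⟩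
      · exact Or.inr ⟨q, Or.inr hq, hx⟩
    · rintro (h | ⟨q, (rfl | hq), hx⟩)
      · exact Or.inl (Or.inl h)
      · exact Or.inl (Or.inr hx)
      · exact Or.inr ⟨q, hq, hx⟩

lemma foldl_aStep_nodup (l : List (List (String × String)))
    (d : PySem.Dict String (PySem.Set String)) (hd : d.keys.Nodup) :
    (l.foldl aStep d).keys.Nodup := by
  induction l generalizing d with
  | nil => exact hd
  | cons p l ih =>
    refine ih _ ?_
    unfold aStep
    by_cases h : ((PySem.Dict.mk p).getD "market_id" "") ≠ ""
    · rw [if_pos h]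
      by_cases hc : (PySem.Dict.mk p).getD "market_id" "" ∈ PySem.Dict.keys d
      · rw [if_pos (by rw [PySem.Dict.contains_iff_mem_keys]; exact hc)]
        exact PySem.Dict.nodup_keys_insert _ _ _ hd
      · rw [if_neg (by rw [PySem.Dict.contains_iff_mem_keys]; exact hc)]
        exact PySem.Dict.nodup_keys_insert _ _ _ (PySem.Dict.nodup_keys_insert _ _ _ hd)
    · rw [if_neg h]
      exact hd

lemma a_iff (positions : List (List (String × String))) :
    check_hedging_py positions = true ↔ pvHedged positions := by
  simp only [check_hedging_py, List.any_eq_true]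
  have hnd : (positions.foldl aStep PySem.Dict.empty).keys.Nodup :=
    foldl_aStep_nodup _ _ (by simp [PySem.Dict.empty, PySem.Dict.keys])
  rw [PySem.Dict.values_eq_map_keys _ hnd PySem.Set.empty]
  have hget : ∀ m s, s ∈ (positions.foldl aStep PySem.Dict.empty).getD m PySem.Set.empty ↔
      ∃ p ∈ positions, (PySem.Dict.mk p).getD "market_id" "" = m ∧ m ≠ "" ∧
        (PySem.Dict.mk p).getD "side" "" = s := by
    intro m s
    rw [foldl_aStep_getD]
    simp [PySem.Dict.empty, PySem.Dict.getD, PySem.Dict.get?, PySem.Set.empty]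
  constructor
  · rintro ⟨v, hv, hchk⟩
    rcases List.mem_map.mp hv with ⟨m, _, rfl⟩
    simp only [Bool.and_eq_true, PySem.Set.contains_iff] at hchk
    rcases (hget m "YES").mp hchk.1 with ⟨p, hp, hpm, hne, hps⟩
    rcases (hget m "NO").mp hchk.2 with ⟨q, hq, hqm, _, hqs⟩
    exact ⟨m, hne, ⟨p, hp, hpm, hps⟩, ⟨q, hq, hqm, hqs⟩⟩
  · rintro ⟨m, hne, ⟨p, hp, hpm, hps⟩, ⟨q, hq, hqm, hqs⟩⟩
    have hyes := (hget m "YES").mpr ⟨p, hp, hpm, hne, hps⟩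
    have hno := (hget m "NO").mpr ⟨q, hq, hqm, hne, hqs⟩
    refine ⟨_, List.mem_map.mpr ⟨m, ?_, rfl⟩, by
      simp only [Bool.and_eq_true, PySem.Set.contains_iff]
      exact ⟨hyes, hno⟩⟩
    by_contra hnk
    have : (positions.foldl aStep PySem.Dict.empty).get? m = none :=
      (PySem.Dict.get?_eq_none_iff_not_mem_keys _ _).mpr hnk
    rw [PySem.Dict.getD] at hyes
    simp [this, PySem.Set.empty] at hyes

-- ===== VERDICT (by name: the statement is the Claim_ definition above) =====
theorem check_hedging_py_spec : Claim_equal_check_hedging_py := by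
  intro positions _
  unfold Spec_check_hedging_py
  have h := (a_iff positions).trans (alt_iff positions).symm
  cases hA : check_hedging_py positions <;> cases hB : check_hedging_py_alt positions <;>
    simp_all
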